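-- pv_equiv track=rewrite | github.com/farrel-a/Tucil3_13520110 | src/Solver.py | _validMatrix
-- ===== SOURCE A (Python) =====
-- def _validMatrix(matrixInput):
--     # check whether matrix is valid 15-puzzle matrix
--     arr = []
--     if (len(matrixInput)) != 4:
--         return False
--     else:
--         for i in range(len(matrixInput)):
--             if len(matrixInput[i]) != 4:
--                 return False
--             else:
--                 for a in matrixInput[i]:
--                     arr.append(a)
--         arr.sort()
--         for i in range(16):
--             if arr[i] != i+1:
--                 return False
--         return True
-- ===== SOURCE B (Python) =====
-- def _validMatrix(matrixInput):
--     # shape check up front, then mark each value in a 16-slot presence array;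
--     # any out-of-range or repeated value fails immediately
--     if len(matrixInput) != 4 or any(len(row) != 4 for row in matrixInput):
--         return False
--     seen = [False] * 16
--     for row in matrixInput:
--         for v in row:
--             if not (1 <= v <= 16) or seen[v - 1]:
--                 return False
--             seen[v - 1] = True
--     return True
-- ===== Notes on version B (the rewrite author's own statement) =====
-- stated objective: alternative
-- what changed: Replaces the append-all/sort/positional-scan pipeline with an early-exit marking pass over a 16-slot boolean presence array: each value must be in 1..16 and unseen, which pins the 16 entries to exactly the permutation 1..16 without sorting.
import Mathlib
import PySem

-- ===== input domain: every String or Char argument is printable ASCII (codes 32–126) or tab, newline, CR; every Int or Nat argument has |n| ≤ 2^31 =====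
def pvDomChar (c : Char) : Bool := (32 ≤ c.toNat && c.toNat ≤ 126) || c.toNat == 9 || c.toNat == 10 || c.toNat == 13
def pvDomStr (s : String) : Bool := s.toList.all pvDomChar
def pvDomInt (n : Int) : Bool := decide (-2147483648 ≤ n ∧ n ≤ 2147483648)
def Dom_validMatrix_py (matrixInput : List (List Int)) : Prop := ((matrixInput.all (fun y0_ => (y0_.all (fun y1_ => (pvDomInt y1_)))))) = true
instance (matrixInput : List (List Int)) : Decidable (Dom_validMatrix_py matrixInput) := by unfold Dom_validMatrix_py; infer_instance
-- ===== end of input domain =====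

-- B replaces A's append-all/sort/positional-scan with an early-exit marking pass over
-- a 16-slot boolean presence array (objective: alternative algorithm, no sort).

-- ===== PORT A =====
-- the row loop of A: append every entry of every row into arr; 'none' = A's early 'return False' on a wrong-length row
def pyCollectRows : List (List Int) → List Int → Option (List Int)
  | [], arr => some arr
  | r :: rs, arr =>
      if PySem.List.len r ≠ 4 then none
      else pyCollectRows rs (arr ++ r)

def validMatrix_py (matrixInput : List (List Int)) : Bool :=
  if PySem.List.len matrixInput ≠ 4 then false
  else
    match pyCollectRows matrixInput [] with
    | none => false
    | some arr =>
        let arrS := PySem.List.sorted arr (fun x => x) false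
        (PySem.List.pyRange 0 16 1).all (fun i => PySem.List.pyGetD arrS i 0 == i + 1)

-- ===== PORT B =====
-- B's inner loop: mark each value in the presence array; 'none' = B's early 'return False'
def altMark : List Int → List Bool → Option (List Bool)
  | [], seen => some seen
  | v :: vs, seen =>
      if ¬ (1 ≤ v ∧ v ≤ 16) ∨ seen.getD (v - 1).toNat false then none
      else altMark vs (seen.set (v - 1).toNat true)

-- B's outer loop over the rows
def altMarkRows : List (List Int) → List Bool → Option (List Bool)
  | [], seen => some seen
  | r :: rs, seen =>
      match altMark r seen with
      | none => none
      | some s => altMarkRows rs s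

def validMatrix_py_alt (matrixInput : List (List Int)) : Bool :=
  if PySem.List.len matrixInput ≠ 4 ∨ matrixInput.any (fun r => PySem.List.len r != 4) then false
  else (altMarkRows matrixInput (List.replicate 16 false)).isSome

-- ===== PRECONDITION & SPEC =====
def Spec_validMatrix_py (matrixInput : List (List Int)) (out : Bool) : Prop := out = validMatrix_py_alt matrixInput
instance (matrixInput : List (List Int)) (out : Bool) : Decidable (Spec_validMatrix_py matrixInput out) := by unfold Spec_validMatrix_py; infer_instance

-- ===== CLAIM (what is proved, stated in full; the proofs are below) =====
def Claim_equal_validMatrix_py : Prop := ∀ (matrixInput : List (List Int)), Dom_validMatrix_py matrixInput → Spec_validMatrix_py matrixInput (validMatrix_py matrixInput)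

-- ===== LEMMAS AND PROOFS =====

def pvTarget : List Int := [1,2,3,4,5,6,7,8,9,10,11,12,13,14,15,16]

lemma pyCollectRows_eq (rs : List (List Int)) (arr : List Int) :
    pyCollectRows rs arr =
      if rs.all (fun r => r.length == 4) then some (arr ++ rs.flatten) else none := by
  induction rs generalizing arr with
  | nil => simp [pyCollectRows]
  | cons r rs ih =>
      by_cases h : r.length = 4
      · simp [pyCollectRows, PySem.List.len_eq, h, ih]
      · simp [pyCollectRows, PySem.List.len_eq, h]
        omega

lemma altMark_append (vs ws : List Int) (s : List Bool) :
    altMark (vs ++ ws) s =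
      match altMark vs s with
      | none => none
      | some s' => altMark ws s' := by
  induction vs generalizing s with
  | nil => simp [altMark]
  | cons v vs ihv =>
      by_cases h : ¬ (1 ≤ v ∧ v ≤ 16) ∨ s.getD (v - 1).toNat false = true
      · simp only [List.cons_append, altMark]
        rw [if_pos h, if_pos h]
      · simp only [List.cons_append, altMark]
        rw [if_neg h, if_neg h, ihv]

lemma altMarkRows_eq_altMark (rs : List (List Int)) (seen : List Bool) :
    altMarkRows rs seen = altMark rs.flatten seen := by
  induction rs generalizing seen with
  | nil => simp [altMarkRows, altMark]
  | cons r rs ih =>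
      simp only [altMarkRows, List.flatten_cons, altMark_append]
      cases altMark r seen with
      | none => rfl
      | some s => exact ih s

lemma altMark_isSome (vs : List Int) (seen : List Bool) (hs : seen.length = 16) :
    (altMark vs seen).isSome = true ↔
      vs.Nodup ∧ ∀ v ∈ vs, (1 ≤ v ∧ v ≤ 16) ∧ seen.getD (v - 1).toNat false = false := by
  induction vs generalizing seen with
  | nil => simp [altMark]
  | cons v vs ih =>
      by_cases hbad : ¬ (1 ≤ v ∧ v ≤ 16) ∨ seen.getD (v - 1).toNat false = true
      · simp only [altMark]
        rw [if_pos hbad]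
        simp only [Option.isSome_none, Bool.false_eq_true, false_iff]
        rintro ⟨-, hall⟩
        have h1 := hall v List.mem_cons_self
        rcases hbad with hb | hb
        · exact hb h1.1
        · rw [h1.2] at hb
          exact absurd hb (by decide)
      · have hrange : 1 ≤ v ∧ v ≤ 16 := by
          by_contra hc; exact hbad (Or.inl hc)
        have hseen : seen.getD (v - 1).toNat false = false := by
          cases hb : seen.getD (v - 1).toNat false with
          | false => rfl
          | true => exact absurd (Or.inr hb) hbad
        have hset : (seen.set (v - 1).toNat true).length = 16 := by simp [hs]
        simp only [altMark]
        rw [if_neg hbad, ih _ hset]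
        have hidx : (v - 1).toNat < 16 := by omega
        constructor
        · rintro ⟨hnd, hall⟩
          refine ⟨List.nodup_cons.mpr ⟨?_, hnd⟩, ?_⟩
          · intro hv
            have := (hall v hv).2
            rw [List.getD_eq_getElem _ _ (by omega)] at this
            simp [List.getElem_set_self] at this
          · intro w hw
            rcases List.mem_cons.mp hw with rfl | hw
            · exact ⟨hrange, hseen⟩
            · have h2 := hall w hw
              refine ⟨h2.1, ?_⟩
              have hwr := h2.1
              by_cases heq : (w - 1).toNat = (v - 1).toNat
              · exfalso
                have := h2.2
                rw [heq, List.getD_eq_getElem _ _ (by omega)] at this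
                simp [List.getElem_set_self] at this
              · have := h2.2
                rw [List.getD_eq_getElem _ _ (by omega)] at this ⊢
                rwa [List.getElem_set_ne (h := by omega)] at this
        · rintro ⟨hnd, hall⟩
          obtain ⟨hvnot, hnd'⟩ := List.nodup_cons.mp hnd
          refine ⟨hnd', ?_⟩
          intro w hw
          have h2 := hall w (List.mem_cons_of_mem _ hw)
          refine ⟨h2.1, ?_⟩
          have hwr := h2.1
          have hne : (w - 1).toNat ≠ (v - 1).toNat := by
            intro heq
            have : w = v := by omega
            exact hvnot (this ▸ hw)
          rw [List.getD_eq_getElem _ _ (by omega)] at h2 ⊢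
          rw [List.getElem_set_ne (h := by omega)]
          exact h2.2

-- A's sorted/positional check as a permutation statement
lemma A_check_iff (flat : List Int) (hlen : flat.length = 16) :
    ((PySem.List.pyRange 0 16 1).all
        (fun i => PySem.List.pyGetD (PySem.List.sorted flat (fun x => x) false) i 0 == i + 1)) = true
      ↔ flat.Perm pvTarget := by
  constructor
  · intro h
    have hsl : (PySem.List.sorted flat (fun x => x) false).length = 16 := by
      rw [PySem.List.length_sorted]; exact hlen
    have hs : PySem.List.sorted flat (fun x => x) false = pvTarget := by
      apply List.ext_getElem
      · simp [hsl, pvTarget]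
      · intro k hk1 hk2
        simp [List.all_eq_true] at h
        have hk16 : k < 16 := by simpa [hsl] using hk1
        have := h (k : Int) (Int.natCast_nonneg k) (by exact_mod_cast hk16)
        rw [PySem.List.pyGetD_natCast] at this
        have hget : (PySem.List.sorted flat (fun x => x) false).getD k 0
            = (PySem.List.sorted flat (fun x => x) false)[k] := by
          exact List.getD_eq_getElem _ _ hk1
        rw [hget] at this
        have htv : pvTarget[k] = (k : Int) + 1 := by
          interval_cases k <;> rfl
        exact this.trans htv.symm
    exact hs ▸ (PySem.List.sorted_perm flat (fun x => x) false).symm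
  · intro hperm
    have hs : PySem.List.sorted flat (fun x => x) false = pvTarget :=
      PySem.List.sorted_eq_of_perm_of_pairwise_lt flat pvTarget (fun x => x) hperm.symm (by decide)
    rw [hs]; decide

-- B's marking pass as a permutation statement
lemma B_check_iff (flat : List Int) (hlen : flat.length = 16) :
    (altMark flat (List.replicate 16 false)).isSome = true ↔ flat.Perm pvTarget := by
  rw [altMark_isSome flat _ (by simp)]
  constructor
  · rintro ⟨hnd, hall⟩
    have hsub : flat ⊆ pvTarget := by
      intro v hv
      have h1 := (hall v hv).1
      simp [pvTarget]
      omega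
    have hsp : flat.Subperm pvTarget := List.subperm_of_subset hnd hsub
    have hl : flat.length = pvTarget.length := by rw [hlen]; rfl
    exact hsp.perm_of_length_le (le_of_eq hl.symm)
  · intro hperm
    refine ⟨hperm.nodup_iff.mpr (by decide), ?_⟩
    intro v hv
    have hv' : v ∈ pvTarget := hperm.mem_iff.mp hv
    have hr : 1 ≤ v ∧ v ≤ 16 := by
      simp [pvTarget] at hv'; omega
    refine ⟨hr, ?_⟩
    rw [List.getD_eq_getElem _ _ (by simp; omega)]
    rw [List.getElem_replicate]

lemma flatten_len (m : List (List Int)) (hm : m.length = 4)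
    (hr : m.all (fun r => r.length == 4) = true) : m.flatten.length = 16 := by
  match m, hm with
  | [a, b, c, d], _ =>
    simp [List.all_cons] at hr
    simp [List.flatten]
    omega

-- ===== VERDICT (by name: the statement is the Claim_ definition above) =====
theorem validMatrix_py_spec : Claim_equal_validMatrix_py := by
  intro m _
  unfold Spec_validMatrix_py validMatrix_py validMatrix_py_alt
  by_cases hlen : m.length = 4
  · have hAcond : ¬ (PySem.List.len m ≠ 4) := by
      rw [PySem.List.len_eq]; simp [hlen]
    by_cases hall : m.all (fun r => r.length == 4) = true
    · have hBcond : ¬ (PySem.List.len m ≠ 4 ∨ m.any (fun r => PySem.List.len r != 4) = true) := by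
        rintro (h | h)
        · exact hAcond h
        · obtain ⟨r, hr, hne⟩ := List.any_eq_true.mp h
          have h4 := (List.all_eq_true.mp hall) r hr
          simp [PySem.List.len_eq] at hne
          simp at h4
          exact hne (by exact_mod_cast h4)
      rw [if_neg hAcond, if_neg hBcond, pyCollectRows_eq, if_pos hall,
          altMarkRows_eq_altMark]
      simp only [List.nil_append]
      have hfl : m.flatten.length = 16 := flatten_len m hlen hall
      by_cases hperm : m.flatten.Perm pvTarget
      · rw [(A_check_iff m.flatten hfl).mpr hperm, (B_check_iff m.flatten hfl).mpr hperm]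
      · rw [Bool.eq_false_iff.mpr (fun h => hperm ((A_check_iff m.flatten hfl).mp h)),
            Bool.eq_false_iff.mpr (fun h => hperm ((B_check_iff m.flatten hfl).mp h))]
    · have hany : m.any (fun r => PySem.List.len r != 4) = true := by
        simp only [List.all_eq_true] at hall
        push_neg at hall
        obtain ⟨r, hr, hne⟩ := hall
        refine List.any_eq_true.mpr ⟨r, hr, ?_⟩
        simp [PySem.List.len_eq]
        simp at hne
        exact_mod_cast hne
      rw [if_neg hAcond, if_pos (Or.inr hany), pyCollectRows_eq, if_neg hall]
  · have hA : PySem.List.len m ≠ 4 := by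
      rw [PySem.List.len_eq]; exact_mod_cast hlen
    rw [if_pos hA, if_pos (Or.inl hA)]
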